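-- pv_equiv track=rewrite | github.com/junhaalee/Algorithm | solved/프로그래머스/징검다리/징검다리.py | solution
-- ===== SOURCE A (Python) =====
-- def solution(stones, k):
--
--     left = 1
--     right = max(stones)+1
--
--     while(left+1 < right):
--
--         mid = (left+right)//2
--
--         if check(stones, k, mid):
--             left = mid
--         else:
--             right = mid
--
--     return left
--
-- def check(stones, k, cnt):
--     count = 0
--
--     for s in stones:
--
--         if s < cnt:
--             count += 1
--         else:
--             count = 0
--
--         if count >= k:
--             return False
--
--     return True
-- ===== SOURCE B (Python) =====
-- def solution(stones, k):
--     # O(n) block method: window max = max(suffix-max of left block part, prefix-max of right block part);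
--     # answer = max(1, min over all windows of size k), or max(1, max(stones)) when k >= len(stones).
--     n = len(stones)
--     if k >= n:
--         m = max(stones)
--     else:
--         pre = []
--         last = 0
--         for j, s in enumerate(stones):
--             last = s if j % k == 0 else max(last, s)
--             pre.append(last)
--         suf = [0] * n
--         for i in range(n - 1, -1, -1):
--             s = stones[i]
--             suf[i] = s if i % k == k - 1 or i == n - 1 else max(s, suf[i + 1])
--         m = min(max(suf[i], pre[i + k - 1]) for i in range(n - k + 1))
--     return m if m > 1 else 1
-- ===== Notes on version B (the rewrite author's own statement) =====
-- stated objective: alternative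
-- what changed: A binary-searches the answer value, rescanning all stones with a counting check per candidate (O(n log max)); B makes one O(n) pass computing block prefix/suffix maxima, takes each window-of-k maximum as max(suffix part, prefix part), returns the minimum clamped below at 1, with max(stones) when k >= len(stones).
-- outside the precondition, e.g. on solution([], 3): A raises ValueError, B raises ValueError; on solution([5], 0): A returns 1, B raises ZeroDivisionError; on solution([5, 2], -1): A returns 1, B raises IndexError
import Mathlib
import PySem

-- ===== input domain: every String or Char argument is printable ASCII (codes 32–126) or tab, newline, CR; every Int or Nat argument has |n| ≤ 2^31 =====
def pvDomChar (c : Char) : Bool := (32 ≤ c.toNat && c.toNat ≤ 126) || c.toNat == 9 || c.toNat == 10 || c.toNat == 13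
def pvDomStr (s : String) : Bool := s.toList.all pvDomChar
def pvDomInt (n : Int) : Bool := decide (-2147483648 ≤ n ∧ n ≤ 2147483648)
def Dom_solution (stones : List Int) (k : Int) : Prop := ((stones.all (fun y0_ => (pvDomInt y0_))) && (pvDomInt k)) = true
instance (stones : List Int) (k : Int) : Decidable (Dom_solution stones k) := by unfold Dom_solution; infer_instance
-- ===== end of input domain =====

-- B replaces A's parametric binary search (binary search on the answer with a linear scan per
-- candidate) by a single O(n) pass: block prefix/suffix maxima give every window-of-k maximum,
-- the answer is the minimum of those clamped below at 1 (objective: alternative algorithm).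

-- ===== PORT A =====
-- helper `check(stones, k, cnt)` of A: count consecutive stones below cnt, fail at k
def checkLoop (k cnt count : Int) : List Int → Bool
  | [] => true
  | s :: rest =>
      let count' := if s < cnt then count + 1 else 0
      if count' ≥ k then false else checkLoop k cnt count' rest

def check (stones : List Int) (k cnt : Int) : Bool := checkLoop k cnt 0 stones

-- midpoint bounds, needed for the binary search's termination
theorem pvMidBounds {l r : Int} (h : l + 1 < r) :
    l < PySem.Int.floordiv (l + r) 2 ∧ PySem.Int.floordiv (l + r) 2 < r := by
  constructor
  · have := (PySem.Int.le_floordiv_iff_mul_le (a := l + r) (q := l + 1) (by norm_num : (0:Int) < 2))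
    omega
  · have := (PySem.Int.floordiv_lt_iff_lt_mul (a := l + r) (q := r) (by norm_num : (0:Int) < 2))
    omega

-- the `while left+1 < right` loop of A
def bsearchA (stones : List Int) (k l r : Int) : Int :=
  if h : l + 1 < r then
    let mid := PySem.Int.floordiv (l + r) 2
    if check stones k mid then bsearchA stones k mid r else bsearchA stones k l mid
  else l
termination_by (r - l).toNat
decreasing_by
  · have := pvMidBounds h; omega
  · have := pvMidBounds h; omega

def solution (stones : List Int) (k : Int) : Int :=
  match PySem.List.max? stones (fun y => y) with
  | none => 0            -- max([]) raises ValueError: excluded by Pre_solution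
  | some mx => bsearchA stones k 1 (mx + 1)

-- ===== PORT B =====
-- `for j, s in enumerate(stones): last = s if j % k == 0 else max(last, s); pre.append(last)`
def buildPre (k j last : Int) : List Int → List Int
  | [] => []
  | s :: rest =>
      let last' := if PySem.Int.mod j k = 0 then s else max last s
      last' :: buildPre k (j + 1) last' rest

-- `for i in range(n-1, -1, -1): suf[i] = s if i % k == k-1 or i == n-1 else max(s, suf[i+1])`
def buildSuf (k n i : Int) : List Int → List Int
  | [] => []
  | s :: rest =>
      let tail := buildSuf k n (i + 1) rest
      (if PySem.Int.mod i k = k - 1 ∨ i = n - 1 then s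
       else max s (PySem.List.pyGetD tail 0 0)) :: tail

def solution_alt (stones : List Int) (k : Int) : Int :=
  let n : Int := PySem.List.len stones
  if k ≥ n then
    match PySem.List.max? stones (fun y => y) with
    | none => 0          -- max([]) raises ValueError: excluded by Pre_solution
    | some m => if m > 1 then m else 1
  else
    let pre := buildPre k 0 0 stones
    let suf := buildSuf k n 0 stones
    match PySem.List.min?
        ((PySem.List.pyRange 0 (n - k + 1) 1).map
          (fun i => max (PySem.List.pyGetD suf i 0) (PySem.List.pyGetD pre (i + k - 1) 0)))
        (fun y => y) with
    | none => 0
    | some m => if m > 1 then m else 1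

-- ===== PRECONDITION & SPEC =====
-- Pre_ excludes the empty list (A's max([]) raises ValueError) and k ≤ 0, which is outside the
-- task's natural domain (a count of consecutive steps); B itself raises there (k = 0 divides by
-- zero, k < 0 indexes out of range) while A happens to return 1.
def Pre_solution (stones : List Int) (k : Int) : Prop := stones ≠ [] ∧ 1 ≤ k
instance (stones : List Int) (k : Int) : Decidable (Pre_solution stones k) := by
  unfold Pre_solution; infer_instance

def pvWitness_solution : List Int × Int := ([2, 4, 5, 3, 2, 1, 4], 3)

def Spec_solution (stones : List Int) (k : Int) (out : Int) : Prop := out = solution_alt stones k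
instance (stones : List Int) (k : Int) (out : Int) : Decidable (Spec_solution stones k out) := by
  unfold Spec_solution; infer_instance

-- ===== CLAIM (what is proved, stated in full; the proofs are below) =====
def Claim_equal_solution : Prop := ∀ (stones : List Int) (k : Int), Dom_solution stones k → Pre_solution stones k → Spec_solution stones k (solution stones k)

-- ===== LEMMAS AND PROOFS =====

-- max/min of a nonempty list (A's `max(stones)`, B's `min(...)`) as a total function
def nmax (l : List Int) : Int := l.max?.getD 0
def nmin (l : List Int) : Int := l.min?.getD 0

-- the slice xs[a:b] of indices [a, b)
def seg (xs : List Int) (a b : Nat) : List Int := (xs.drop a).take (b - a)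

-- all window maxima for window size K, and their minimum
def wins (xs : List Int) (K : Nat) : List Int :=
  (List.range (xs.length - K + 1)).map (fun i => nmax (seg xs i (i + K)))
def Mv (xs : List Int) (K : Nat) : Int := nmin (wins xs K)

-- `stones` contains k consecutive values below c somewhere
def HasRun (c k : Int) (xs : List Int) : Prop :=
  ∃ u w v, xs = u ++ w ++ v ∧ k ≤ (w.length : Int) ∧ ∀ x ∈ w, x < c

theorem nmax_cons (x : Int) (t : List Int) : nmax (x :: t) = t.foldl max x := by
  unfold nmax
  rw [List.max?_cons']
  rfl

theorem nmax_eq_some {l : List Int} (h : l ≠ []) : l.max? = some (nmax l) := by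
  cases hm : l.max? with
  | none => exact absurd (List.max?_eq_none_iff.mp hm) h
  | some a => simp [nmax, hm]

theorem nmin_eq_some {l : List Int} (h : l ≠ []) : l.min? = some (nmin l) := by
  cases hm : l.min? with
  | none => exact absurd (List.min?_eq_none_iff.mp hm) h
  | some a => simp [nmin, hm]

theorem nmax_spec {l : List Int} (h : l ≠ []) : nmax l ∈ l ∧ ∀ x ∈ l, x ≤ nmax l :=
  List.max?_eq_some_iff.mp (nmax_eq_some h)

theorem nmin_spec {l : List Int} (h : l ≠ []) : nmin l ∈ l ∧ ∀ x ∈ l, nmin l ≤ x :=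
  List.min?_eq_some_iff.mp (nmin_eq_some h)

theorem le_nmax_iff {l : List Int} (h : l ≠ []) {c : Int} : c ≤ nmax l ↔ ∃ x ∈ l, c ≤ x := by
  constructor
  · exact fun hc => ⟨nmax l, (nmax_spec h).1, hc⟩
  · rintro ⟨x, hx, hc⟩
    exact le_trans hc ((nmax_spec h).2 x hx)

theorem le_nmin_iff {l : List Int} (h : l ≠ []) {c : Int} : c ≤ nmin l ↔ ∀ x ∈ l, c ≤ x := by
  constructor
  · exact fun hc x hx => le_trans hc ((nmin_spec h).2 x hx)
  · exact fun hall => hall _ (nmin_spec h).1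

theorem nmax_cons_max (x : Int) {l : List Int} (h : l ≠ []) : nmax (x :: l) = max x (nmax l) := by
  have hc : (x :: l) ≠ [] := by simp
  apply le_antisymm
  · rcases List.mem_cons.mp (nmax_spec hc).1 with hm | hm
    · rw [hm]; exact le_max_left _ _
    · exact le_trans ((nmax_spec h).2 _ hm) (le_max_right _ _)
  · refine max_le ((nmax_spec hc).2 x (by simp)) ((nmax_spec hc).2 _ ?_)
    exact List.mem_cons_of_mem x (nmax_spec h).1

theorem nmax_append {l₁ l₂ : List Int} (h₁ : l₁ ≠ []) (h₂ : l₂ ≠ []) :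
    nmax (l₁ ++ l₂) = max (nmax l₁) (nmax l₂) := by
  have hc : l₁ ++ l₂ ≠ [] := by simp [h₁]
  apply le_antisymm
  · rcases List.mem_append.mp (nmax_spec hc).1 with hm | hm
    · exact le_trans ((nmax_spec h₁).2 _ hm) (le_max_left _ _)
    · exact le_trans ((nmax_spec h₂).2 _ hm) (le_max_right _ _)
  · refine max_le ((nmax_spec hc).2 _ ?_) ((nmax_spec hc).2 _ ?_)
    · exact List.mem_append.mpr (Or.inl (nmax_spec h₁).1)
    · exact List.mem_append.mpr (Or.inr (nmax_spec h₂).1)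

theorem min?_eq_nmin {l : List Int} (h : l ≠ []) :
    PySem.List.min? l (fun y => y) = some (nmin l) := by
  match l with
  | x :: t =>
    rw [PySem.List.min?_id_cons]
    have : nmin (x :: t) = t.foldl min x := by
      unfold nmin
      rw [List.min?_cons']
      rfl
    rw [this]

-- seg facts
theorem seg_length (xs : List Int) (a b : Nat) :
    (seg xs a b).length = min (b - a) (xs.length - a) := by
  simp [seg]

theorem seg_append (xs : List Int) {a m b : Nat} (h1 : a ≤ m) (h2 : m ≤ b) :
    seg xs a b = seg xs a m ++ seg xs m b := by
  unfold seg
  have hb : b - a = (m - a) + (b - m) := by omega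
  rw [hb, List.take_add, List.drop_drop]
  have hm : a + (m - a) = m := by omega
  rw [hm]

theorem seg_cons (xs : List Int) {a b : Nat} (h1 : a < b) (h2 : a < xs.length) :
    seg xs a b = xs[a] :: seg xs (a + 1) b := by
  unfold seg
  rw [List.drop_eq_getElem_cons h2]
  have hb : b - a = (b - (a + 1)) + 1 := by omega
  rw [hb, List.take_succ_cons]

theorem seg_single (xs : List Int) {a : Nat} (h : a < xs.length) : seg xs a (a + 1) = [xs[a]] := by
  rw [seg_cons xs (by omega) h]
  simp [seg]

theorem seg_shift (x : Int) (xs : List Int) (a b : Nat) :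
    seg (x :: xs) (a + 1) (b + 1) = seg xs a b := by
  unfold seg
  rw [List.drop_succ_cons]
  congr 1
  omega

theorem seg_subset (xs : List Int) (a b : Nat) : seg xs a b ⊆ xs := by
  intro x hx
  exact List.drop_subset a xs (List.take_subset _ _ hx)

theorem seg_ne_nil (xs : List Int) {a b : Nat} (h1 : a < b) (h2 : a < xs.length) :
    seg xs a b ≠ [] := by
  have := seg_length xs a b
  intro hn
  rw [hn] at this
  simp at this
  omega

theorem hasRun_cons {c k s : Int} {xs : List Int} (h : HasRun c k xs) : HasRun c k (s :: xs) := by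
  obtain ⟨u, w, v, heq, hlen, hlt⟩ := h
  exact ⟨s :: u, w, v, by rw [heq]; rfl, hlen, hlt⟩

theorem hasRun_of_takeWhile {c k : Int} {xs : List Int}
    (h : k ≤ ((xs.takeWhile (fun x => decide (x < c))).length : Int)) : HasRun c k xs :=
  ⟨[], xs.takeWhile (fun x => decide (x < c)), xs.dropWhile (fun x => decide (x < c)),
    by rw [List.nil_append, List.takeWhile_append_dropWhile], h,
    fun x hx => by simpa using List.mem_takeWhile_imp hx⟩

-- the check loop characterised: it fails iff the carried count plus the leading run reaches k,
-- or some run of k consecutive values below cnt occurs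
theorem checkLoop_false_iff {k c : Int} (hk : 1 ≤ k) :
    ∀ (xs : List Int) (m : Int), 0 ≤ m →
      (checkLoop k c m xs = false ↔
        (1 ≤ (xs.takeWhile (fun x => decide (x < c))).length ∧
          k ≤ m + ((xs.takeWhile (fun x => decide (x < c))).length : Int)) ∨ HasRun c k xs) := by
  intro xs
  induction xs with
  | nil =>
    intro m hm
    simp only [checkLoop, List.takeWhile_nil, List.length_nil]
    constructor
    · intro h; exact absurd h (by simp)
    · rintro (⟨h1, _⟩ | ⟨u, w, v, heq, hlen, _⟩)
      · omega
      · have : w = [] := by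
          exact (List.append_eq_nil_iff.mp (List.append_eq_nil_iff.mp heq.symm).1).2
        rw [this] at hlen
        simp at hlen
        omega
  | cons s rest ih =>
    intro m hm
    by_cases hs : s < c
    · simp only [checkLoop, if_pos hs, List.takeWhile_cons, decide_eq_true hs, if_pos trivial]
      by_cases hge : m + 1 ≥ k
      · rw [if_pos hge]
        simp only [List.length_cons]
        constructor
        · intro _
          left
          constructor
          · omega
          · push_cast; omega
        · intro _; trivial
      · rw [if_neg hge]
        rw [ih (m + 1) (by omega)]
        simp only [List.length_cons]
        constructor
        · rintro (⟨h1, h2⟩ | hr)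
          · left; constructor
            · omega
            · push_cast at h2 ⊢; omega
          · exact Or.inr (hasRun_cons hr)
        · rintro (⟨_, h2⟩ | hr)
          · by_cases hL : 1 ≤ (rest.takeWhile (fun x => decide (x < c))).length
            · left; constructor
              · exact hL
              · push_cast at h2 ⊢; omega
            · exfalso
              have : (rest.takeWhile (fun x => decide (x < c))).length = 0 := by omega
              rw [this] at h2
              push_cast at h2
              omega
          · obtain ⟨u, w, v, heq, hlen, hlt⟩ := hr
            cases u with
            | nil =>
              cases w with
              | nil => simp at hlen; omega
              | cons w0 w' =>
                have hrest : rest = w' ++ v := by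
                  simpa using congrArg List.tail heq
                have hall : ∀ x ∈ w', decide (x < c) = true := by
                  intro x hx
                  exact decide_eq_true (hlt x (List.mem_cons_of_mem w0 hx))
                have hTW : (rest.takeWhile (fun x => decide (x < c))) =
                    w' ++ (v.takeWhile (fun x => decide (x < c))) := by
                  rw [hrest]
                  exact List.takeWhile_append_of_pos hall
                have hlen' : w'.length ≤ (rest.takeWhile (fun x => decide (x < c))).length := by
                  rw [hTW]; simp
                simp only [List.length_cons] at hlen
                push_cast at hlen
                left
                constructor
                · omega
                · push_cast
                  omega
            | cons a u' =>
              have hrest : rest = u' ++ w ++ v := by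
                simpa using congrArg List.tail heq
              exact Or.inr ⟨u', w, v, hrest, hlen, hlt⟩
    · have h0 : ¬ ((0 : Int) ≥ k) := by omega
      simp only [checkLoop, if_neg hs, if_neg h0]
      rw [ih 0 le_rfl]
      have hTW : List.takeWhile (fun x => decide (x < c)) (s :: rest) = [] := by
        simp [hs]
      rw [hTW]
      simp only [List.length_nil, Nat.cast_zero]
      constructor
      · rintro (⟨_, h2⟩ | hr)
        · exact Or.inr (hasRun_cons (hasRun_of_takeWhile (by omega)))
        · exact Or.inr (hasRun_cons hr)
      · rintro (⟨h1, _⟩ | hr)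
        · omega
        · obtain ⟨u, w, v, heq, hlen, hlt⟩ := hr
          cases u with
          | nil =>
            cases w with
            | nil => simp at hlen; omega
            | cons w0 w' =>
              exfalso
              have : w0 = s := by simpa using (congrArg List.head? heq).symm
              exact hs (this ▸ hlt w0 (List.mem_cons_self))
          | cons a u' =>
            have hrest : rest = u' ++ w ++ v := by
              simpa using congrArg List.tail heq
            exact Or.inr ⟨u', w, v, hrest, hlen, hlt⟩

theorem check_true_iff {stones : List Int} {k c : Int} (hk : 1 ≤ k) :
    check stones k c = true ↔ ¬ HasRun c k stones := by
  have hfalse := checkLoop_false_iff (c := c) hk stones 0 le_rfl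
  unfold check
  constructor
  · intro ht hr
    rw [ht] at hfalse
    simp at hfalse
    exact hfalse.2 hr
  · intro hnr
    cases hb : checkLoop k c 0 stones with
    | false =>
      exfalso
      rcases hfalse.mp hb with ⟨h1, h2⟩ | hr
      · exact hnr (hasRun_of_takeWhile (by omega))
      · exact hnr hr
    | true => rfl

theorem hasRun_iff_window {c k : Int} {xs : List Int} (hk : 1 ≤ k) :
    HasRun c k xs ↔ ∃ i, i + k.toNat ≤ xs.length ∧ ∀ x ∈ seg xs i (i + k.toNat), x < c := by
  constructor
  · rintro ⟨u, w, v, heq, hlen, hlt⟩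
    refine ⟨u.length, ?_, ?_⟩
    · rw [heq]
      simp
      omega
    · intro x hx
      apply hlt
      have hdrop : xs.drop u.length = w ++ v := by
        rw [heq, List.append_assoc, List.drop_left]
      unfold seg at hx
      rw [hdrop] at hx
      have hKw : u.length + k.toNat - u.length ≤ w.length := by omega
      rw [List.take_append_of_le_length hKw] at hx
      exact List.take_subset _ _ hx
  · rintro ⟨i, hle, hlt⟩
    refine ⟨xs.take i, seg xs i (i + k.toNat), xs.drop (i + k.toNat), ?_, ?_, hlt⟩
    · unfold seg
      have h1 : i + k.toNat - i = k.toNat := by omega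
      rw [h1]
      rw [← List.drop_drop, List.append_assoc, List.take_append_drop, List.take_append_drop]
    · rw [seg_length]
      have : min (i + k.toNat - i) (xs.length - i) = k.toNat := by omega
      rw [this]
      omega

theorem max?_id_eq_nmax {l : List Int} (h : l ≠ []) :
    PySem.List.max? l (fun y => y) = some (nmax l) := by
  match l with
  | x :: t =>
    rw [PySem.List.max?_id_cons, nmax_cons]

theorem wins_ne_nil {stones : List Int} {K : Nat} : wins stones K ≠ [] := by
  unfold wins
  simp only [ne_eq, List.map_eq_nil_iff, List.range_eq_nil]
  omega

theorem Mv_le_nmax {stones : List Int} {K : Nat} (hne : stones ≠ []) (hK : 1 ≤ K)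
    (hKn : K ≤ stones.length) : Mv stones K ≤ nmax stones := by
  have hm := nmin_spec (wins_ne_nil (stones := stones) (K := K))
  unfold wins at hm
  obtain ⟨i, hi, heq⟩ := List.mem_map.mp hm.1
  rw [List.mem_range] at hi
  have hsne : seg stones i (i + K) ≠ [] := seg_ne_nil stones (by omega) (by omega)
  have hmem : nmax (seg stones i (i + K)) ∈ stones :=
    seg_subset stones i (i + K) (nmax_spec hsne).1
  calc Mv stones K = nmax (seg stones i (i + K)) := heq.symm
    _ ≤ nmax stones := (nmax_spec hne).2 _ hmem

theorem check_true_iff_le_Mv {stones : List Int} {k c : Int} (hk : 1 ≤ k)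
    (hkn : k.toNat ≤ stones.length) :
    (check stones k c = true) ↔ c ≤ Mv stones k.toNat := by
  rw [check_true_iff hk, hasRun_iff_window hk]
  push_neg
  unfold Mv
  rw [le_nmin_iff (wins_ne_nil (stones := stones) (K := k.toNat))]
  unfold wins
  constructor
  · intro h w hw
    simp only [List.mem_map, List.mem_range] at hw
    obtain ⟨i, hi, rfl⟩ := hw
    have hle : i + k.toNat ≤ stones.length := by omega
    have hne : seg stones i (i + k.toNat) ≠ [] := seg_ne_nil stones (by omega) (by omega)
    rw [le_nmax_iff hne]
    obtain ⟨x, hx, hcx⟩ := h i hle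
    exact ⟨x, hx, by omega⟩
  · intro h i hle
    have hne : seg stones i (i + k.toNat) ≠ [] := seg_ne_nil stones (by omega) (by omega)
    have hw : nmax (seg stones i (i + k.toNat)) ∈
        (List.range (stones.length - k.toNat + 1)).map
          (fun i => nmax (seg stones i (i + k.toNat))) := by
      simp only [List.mem_map, List.mem_range]
      exact ⟨i, by omega, rfl⟩
    have hx := (le_nmax_iff hne).mp (h _ hw)
    obtain ⟨x, hx, hcx⟩ := hx
    exact ⟨x, hx, by omega⟩

-- binary search: with a threshold description of check, the loop computes the clamp
theorem bsearchA_eq (stones : List Int) (k B : Int) :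
    ∀ (N : Nat) (l r : Int), (r - l).toNat ≤ N → l < r →
      (∀ c, l < c → c < r → (check stones k c = true ↔ c ≤ B)) →
      bsearchA stones k l r = max l (min (r - 1) B) := by
  intro N
  induction N with
  | zero =>
    intro l r h hlr _
    exfalso
    omega
  | succ N ih =>
    intro l r hN hlr hgood
    rw [bsearchA]
    by_cases hc : l + 1 < r
    · rw [dif_pos hc]
      have hmid := pvMidBounds hc
      by_cases hchk : check stones k (PySem.Int.floordiv (l + r) 2) = true
      · simp only [hchk, if_true]
        have hB : PySem.Int.floordiv (l + r) 2 ≤ B :=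
          (hgood _ hmid.1 hmid.2).mp hchk
        rw [ih _ r (by omega) hmid.2 (fun c h1 h2 => hgood c (by omega) h2)]
        simp only [max_def, min_def]
        split_ifs <;> omega
      · simp only [hchk, Bool.false_eq_true, if_false]
        have hB : B < PySem.Int.floordiv (l + r) 2 := by
          by_contra hle
          exact hchk ((hgood _ hmid.1 hmid.2).mpr (by omega))
        rw [ih l _ (by omega) hmid.1 (fun c h1 h2 => hgood c h1 (by omega))]
        simp only [max_def, min_def]
        split_ifs <;> omega
    · rw [dif_neg hc]
      simp only [max_def, min_def]
      split_ifs <;> omega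

-- A computes the clamped minimum window maximum
theorem solution_eq (stones : List Int) (k : Int) (hne : stones ≠ []) (hk : 1 ≤ k) :
    solution stones k =
      if (stones.length : Int) ≤ k then max 1 (nmax stones)
      else max 1 (Mv stones k.toNat) := by
  unfold solution
  rw [max?_id_eq_nmax hne]
  show bsearchA stones k 1 (nmax stones + 1) = _
  by_cases hmx : nmax stones ≤ 0
  · -- right end ≤ 1: the loop body never runs and A returns 1
    rw [bsearchA, dif_neg (by omega)]
    by_cases hkn : (stones.length : Int) ≤ k
    · rw [if_pos hkn]
      simp only [max_def]
      split_ifs <;> omega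
    · rw [if_neg hkn]
      have hMv : Mv stones k.toNat ≤ nmax stones := Mv_le_nmax hne (by omega) (by omega)
      simp only [max_def]
      split_ifs <;> omega
  · have hcase : ∀ B : Int,
        (∀ c, 1 < c → c < nmax stones + 1 → (check stones k c = true ↔ c ≤ B)) →
        bsearchA stones k 1 (nmax stones + 1) = max 1 (min (nmax stones) B) := by
      intro B hgood
      have := bsearchA_eq stones k B (nmax stones + 1 - 1).toNat 1 (nmax stones + 1)
        (by omega) (by omega) hgood
      rw [this]
      simp only [min_def]
      split_ifs <;> omega
    by_cases hkn : (stones.length : Int) ≤ k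
    · rw [if_pos hkn]
      rw [hcase (nmax stones) ?_]
      · simp only [max_def, min_def]
        split_ifs <;> omega
      · intro c h1 h2
        constructor
        · intro _; omega
        · intro _
          rw [check_true_iff hk]
          rintro ⟨u, w, v, heq, hlen, hlt⟩
          have hlensum : u.length + w.length + v.length = stones.length := by
            have := congrArg List.length heq
            simp at this
            omega
          have hwlen : w.length = stones.length ∧ u.length = 0 ∧ v.length = 0 := by omega
          have hw : w = stones := by
            rw [heq]
            have hu : u = [] := List.length_eq_zero_iff.mp hwlen.2.1
            have hv : v = [] := List.length_eq_zero_iff.mp hwlen.2.2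
            simp [hu, hv]
          have := hlt (nmax stones) (hw ▸ (nmax_spec hne).1)
          omega
    · rw [if_neg hkn]
      have hKn : k.toNat ≤ stones.length := by omega
      rw [hcase (Mv stones k.toNat) (fun c _ _ => check_true_iff_le_Mv hk hKn)]
      have hMv : Mv stones k.toNat ≤ nmax stones := Mv_le_nmax hne (by omega) hKn
      simp only [max_def, min_def]
      split_ifs <;> omega

-- B-side: closed forms of the two passes
theorem buildPre_length (k j last : Int) (xs : List Int) :
    (buildPre k j last xs).length = xs.length := by
  induction xs generalizing j last with
  | nil => rfl
  | cons s rest ih => simp [buildPre, ih]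

theorem buildSuf_length (k n i : Int) (xs : List Int) :
    (buildSuf k n i xs).length = xs.length := by
  induction xs generalizing i with
  | nil => rfl
  | cons s rest ih => simp [buildSuf, ih]

theorem buildPre_getElem {k : Int} (hk : 1 ≤ k) :
    ∀ (ys : List Int) (jn : Nat) (last : Int) (t : Nat) (ht : t < ys.length),
      (buildPre k (jn : Int) last ys)[t]'(by rw [buildPre_length]; exact ht) =
        (if ((jn + t) % k.toNat) ≤ t
          then nmax (seg ys (t - (jn + t) % k.toNat) (t + 1))
          else max last (nmax (seg ys 0 (t + 1)))) := by
  intro ys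
  induction ys with
  | nil => intro jn last t ht; simp at ht
  | cons s rest ih =>
    intro jn last t ht
    have hmod : PySem.Int.mod (jn : Int) k = ((jn % k.toNat : Nat) : Int) := by
      conv_lhs => rw [show (k : Int) = ((k.toNat : Nat) : Int) by omega]
      exact PySem.Int.mod_natCast _ _
    have hunfold : buildPre k (jn : Int) last (s :: rest) =
        (if PySem.Int.mod (jn : Int) k = 0 then s else max last s) ::
          buildPre k ((jn : Int) + 1) (if PySem.Int.mod (jn : Int) k = 0 then s else max last s)
            rest := rfl
    have hcast : ((jn : Int) + 1) = ((jn + 1 : Nat) : Int) := by push_cast; ring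
    have hseg1 : seg (s :: rest) 0 1 = [s] := by
      have := seg_single (s :: rest) (a := 0) (by simp)
      simpa using this
    have hnmax1 : nmax [s] = s := by rw [show [s] = s :: ([] : List Int) from rfl, nmax_cons]; rfl
    cases t with
    | zero =>
      simp only [hunfold, List.getElem_cons_zero, Nat.add_zero]
      by_cases hr : jn % k.toNat = 0
      · rw [if_pos (by rw [hmod, hr]; rfl), if_pos (by omega), hr]
        simp only [Nat.sub_zero]
        rw [hseg1, hnmax1]
      · rw [if_neg (by rw [hmod]; intro hh; exact hr (by exact_mod_cast hh)),
            if_neg (by omega)]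
        rw [hseg1, hnmax1]
    | succ t =>
      simp only [hunfold, List.getElem_cons_succ]
      have htrest : t < rest.length := by simpa using Nat.lt_of_succ_lt_succ ht
      simp only [hcast]
      rw [ih (jn + 1) _ t htrest]
      rw [show jn + 1 + t = jn + (t + 1) by omega]
      have hrK : (jn + (t + 1)) % k.toNat < k.toNat := Nat.mod_lt _ (by omega)
      by_cases h1 : (jn + (t + 1)) % k.toNat ≤ t
      · rw [if_pos h1, if_pos (by omega)]
        rw [show t + 1 - (jn + (t + 1)) % k.toNat = (t - (jn + (t + 1)) % k.toNat) + 1 by omega,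
            show t + 1 + 1 = (t + 1) + 1 from rfl, seg_shift]
      · rw [if_neg h1]
        have hne : seg rest 0 (t + 1) ≠ [] := seg_ne_nil rest (by omega) (by omega)
        have hsegcons : seg (s :: rest) 0 (t + 1 + 1) = s :: seg rest 0 (t + 1) := by
          rw [seg_cons (s :: rest) (by omega) (by simp)]
          rw [show (0 : Nat) + 1 = 0 + 1 from rfl, seg_shift]
          simp
        by_cases h2 : (jn + (t + 1)) % k.toNat = t + 1
        · have hjmod : jn % k.toNat = 0 := by
            have hdm := Nat.div_add_mod (jn + (t + 1)) k.toNat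
            have hj : jn = k.toNat * ((jn + (t + 1)) / k.toNat) := by omega
            rw [hj]
            exact Nat.mul_mod_right _ _
          rw [if_pos (by rw [hmod, hjmod]; rfl), if_pos (by omega)]
          rw [h2, show t + 1 - (t + 1) = 0 by omega]
          rw [hsegcons, nmax_cons_max s hne]
        · have hjmod : jn % k.toNat ≠ 0 := by
            intro h0
            have hmm : (jn + (t + 1)) % k.toNat = (t + 1) % k.toNat := by
              conv_lhs => rw [Nat.add_mod, h0]
              simp
            have := Nat.mod_le (t + 1) k.toNat
            omega
          rw [if_neg (by rw [hmod]; intro hh; exact hjmod (by exact_mod_cast hh)),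
              if_neg (by omega)]
          rw [hsegcons, nmax_cons_max s hne]
          exact max_assoc last s _

theorem buildSuf_getElem {k : Int} (hk : 1 ≤ k) {N : Nat} :
    ∀ (ys : List Int) (i0 : Nat) (t : Nat) (ht : t < ys.length), i0 + ys.length = N →
      (buildSuf k (N : Int) (i0 : Int) ys)[t]'(by rw [buildSuf_length]; exact ht) =
        nmax (seg ys t (min ys.length (t + k.toNat - (i0 + t) % k.toNat))) := by
  intro ys
  induction ys with
  | nil => intro i0 t ht; simp at ht
  | cons s rest ih =>
    intro i0 t ht hN
    have hmod : PySem.Int.mod (i0 : Int) k = ((i0 % k.toNat : Nat) : Int) := by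
      conv_lhs => rw [show (k : Int) = ((k.toNat : Nat) : Int) by omega]
      exact PySem.Int.mod_natCast _ _
    have hrK : i0 % k.toNat < k.toNat := Nat.mod_lt _ (by omega)
    have hunfold : buildSuf k (N : Int) (i0 : Int) (s :: rest) =
        (if PySem.Int.mod (i0 : Int) k = k - 1 ∨ (i0 : Int) = (N : Int) - 1 then s
         else max s (PySem.List.pyGetD (buildSuf k (N : Int) ((i0 : Int) + 1) rest) 0 0)) ::
          buildSuf k (N : Int) ((i0 : Int) + 1) rest := rfl
    have hcast : ((i0 : Int) + 1) = ((i0 + 1 : Nat) : Int) := by push_cast; ring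
    have hNlen : i0 + (rest.length + 1) = N := by simpa using hN
    cases t with
    | zero =>
      simp only [hunfold, List.getElem_cons_zero, Nat.add_zero, Nat.zero_add]
      by_cases hb : PySem.Int.mod (i0 : Int) k = k - 1 ∨ (i0 : Int) = (N : Int) - 1
      · rw [if_pos hb]
        have he : min (s :: rest).length (k.toNat - i0 % k.toNat) = 1 := by
          rcases hb with hb | hb
          · have hm : i0 % k.toNat = k.toNat - 1 := by
              rw [hmod] at hb
              omega
            simp only [List.length_cons]
            omega
          · have hlen0 : rest.length = 0 := by omega
            simp only [List.length_cons, hlen0]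
            omega
        rw [he]
        have hs1 : seg (s :: rest) 0 1 = [s] := by
          have := seg_single (s :: rest) (a := 0) (by simp)
          simpa using this
        rw [hs1, show [s] = s :: ([] : List Int) from rfl, nmax_cons]
        rfl
      · rw [if_neg hb]
        push_neg at hb
        have hrest : 1 ≤ rest.length := by
          by_contra h0
          exact hb.2 (by omega)
        have hm : i0 % k.toNat ≠ k.toNat - 1 := by
          intro hm
          apply hb.1
          rw [hmod]
          omega
        have hsucc : (i0 + 1) % k.toNat = i0 % k.toNat + 1 := by
          have hd := Nat.div_add_mod i0 k.toNat
          rw [show i0 + 1 = k.toNat * (i0 / k.toNat) + (i0 % k.toNat + 1) by omega,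
              Nat.mul_add_mod]
          exact Nat.mod_eq_of_lt (by omega)
        have hlen : (buildSuf k (N : Int) ((i0 : Int) + 1) rest).length = rest.length :=
          buildSuf_length _ _ _ _
        have hget : PySem.List.pyGetD (buildSuf k (N : Int) ((i0 : Int) + 1) rest) 0 0 =
            (buildSuf k (N : Int) ((i0 : Int) + 1) rest)[0]'(by omega) := by
          rw [show (0 : Int) = ((0 : Nat) : Int) from rfl, PySem.List.pyGetD_natCast]
          exact List.getD_eq_getElem _ _ (by omega)
        rw [hget]
        simp only [hcast]
        rw [ih (i0 + 1) 0 (by omega) (by omega)]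
        simp only [Nat.zero_add]
        have hsne : seg rest 0 (min rest.length (k.toNat - (i0 + 1) % k.toNat)) ≠ [] := by
          apply seg_ne_nil rest ?_ (by omega)
          rw [hsucc]
          omega
        have hcons : seg (s :: rest) 0 (min (s :: rest).length (k.toNat - i0 % k.toNat)) =
            s :: seg rest 0 (min rest.length (k.toNat - (i0 + 1) % k.toNat)) := by
          have hEe : min (s :: rest).length (k.toNat - i0 % k.toNat) =
              (min rest.length (k.toNat - (i0 + 1) % k.toNat)) + 1 := by
            simp only [List.length_cons]
            rw [hsucc]
            omega
          rw [hEe, seg_cons (s :: rest) (by omega) (by simp),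
              show (0 : Nat) + 1 = 0 + 1 from rfl, seg_shift]
          simp
        rw [hcons, nmax_cons_max s hsne]
    | succ t =>
      simp only [hunfold, List.getElem_cons_succ]
      have htrest : t < rest.length := by simpa using Nat.lt_of_succ_lt_succ ht
      simp only [hcast]
      rw [ih (i0 + 1) t htrest (by omega)]
      rw [show i0 + 1 + t = i0 + (t + 1) by omega]
      have hrK2 : (i0 + (t + 1)) % k.toNat < k.toNat := Nat.mod_lt _ (by omega)
      have hEe : min (s :: rest).length (t + 1 + k.toNat - (i0 + (t + 1)) % k.toNat) =
          (min rest.length (t + k.toNat - (i0 + (t + 1)) % k.toNat)) + 1 := by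
        simp only [List.length_cons]
        omega
      rw [hEe, seg_shift]

-- combining suffix and prefix block maxima gives the window maximum
theorem window_max (stones : List Int) {k : Int} (hk : 1 ≤ k) {i : Nat}
    (hw : i + k.toNat ≤ stones.length) :
    max ((buildSuf k (stones.length : Int) 0 stones)[i]'(by rw [buildSuf_length]; omega))
        ((buildPre k 0 0 stones)[i + k.toNat - 1]'(by rw [buildPre_length]; omega)) =
      nmax (seg stones i (i + k.toNat)) := by
  have hK0 : 0 < k.toNat := by omega
  have hS := buildSuf_getElem hk (N := stones.length) stones 0 i (by omega) (by omega)
  have hP := buildPre_getElem hk stones 0 0 (i + k.toNat - 1) (by omega)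
  simp only [Nat.cast_zero, Nat.zero_add] at hS hP
  rw [hS, hP]
  have hr2K : (i + k.toNat - 1) % k.toNat < k.toNat := Nat.mod_lt _ hK0
  rw [if_pos (by omega)]
  have hd := Nat.div_add_mod i k.toNat
  have hrho : i % k.toNat < k.toNat := Nat.mod_lt _ hK0
  by_cases hρ : i % k.toNat = 0
  · have hr2 : (i + k.toNat - 1) % k.toNat = k.toNat - 1 := by
      rw [show i + k.toNat - 1 = k.toNat * (i / k.toNat) + (k.toNat - 1) by omega,
          Nat.mul_add_mod]
      exact Nat.mod_eq_of_lt (by omega)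
    rw [hr2]
    rw [show i + k.toNat - 1 - (k.toNat - 1) = i by omega,
        show i + k.toNat - 1 + 1 = i + k.toNat by omega,
        show min stones.length (i + k.toNat - i % k.toNat) = i + k.toNat by omega]
    exact max_self _
  · have hr2 : (i + k.toNat - 1) % k.toNat = i % k.toNat - 1 := by
      have hd2 : k.toNat * (i / k.toNat + 1) = k.toNat * (i / k.toNat) + k.toNat := by ring
      rw [show i + k.toNat - 1 = k.toNat * (i / k.toNat + 1) + (i % k.toNat - 1) by omega,
          Nat.mul_add_mod]
      exact Nat.mod_eq_of_lt (by omega)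
    rw [hr2]
    rw [show i + k.toNat - 1 - (i % k.toNat - 1) = i + k.toNat - i % k.toNat by omega,
        show i + k.toNat - 1 + 1 = i + k.toNat by omega,
        show min stones.length (i + k.toNat - i % k.toNat) = i + k.toNat - i % k.toNat by omega]
    have h1 : seg stones i (i + k.toNat - i % k.toNat) ≠ [] :=
      seg_ne_nil stones (by omega) (by omega)
    have h2 : seg stones (i + k.toNat - i % k.toNat) (i + k.toNat) ≠ [] :=
      seg_ne_nil stones (by omega) (by omega)
    rw [seg_append stones (by omega : i ≤ i + k.toNat - i % k.toNat)
          (by omega : i + k.toNat - i % k.toNat ≤ i + k.toNat),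
        nmax_append h1 h2]

-- B computes the clamped minimum window maximum
theorem solution_alt_eq (stones : List Int) (k : Int) (hne : stones ≠ []) (hk : 1 ≤ k) :
    solution_alt stones k =
      if (stones.length : Int) ≤ k then max 1 (nmax stones)
      else max 1 (Mv stones k.toNat) := by
  unfold solution_alt
  simp only [PySem.List.len_eq]
  by_cases hkn : k ≥ (stones.length : Int)
  · rw [if_pos hkn, max?_id_eq_nmax hne, if_pos (by omega : (stones.length : Int) ≤ k)]
    show (if nmax stones > 1 then nmax stones else 1) = _
    simp only [max_def]
    split_ifs <;> omega
  · rw [if_neg hkn, if_neg (by omega)]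
    have hK0 : 0 < k.toNat := by omega
    have hKn : k.toNat < stones.length := by omega
    have hlist : (PySem.List.pyRange 0 ((stones.length : Int) - k + 1) 1).map
        (fun i => max (PySem.List.pyGetD (buildSuf k (stones.length : Int) 0 stones) i 0)
          (PySem.List.pyGetD (buildPre k 0 0 stones) (i + k - 1) 0)) = wins stones k.toNat := by
      rw [PySem.List.pyRange_one, List.map_map]
      rw [show (((stones.length : Int) - k + 1) - 0).toNat = stones.length - k.toNat + 1 by omega]
      unfold wins
      apply List.map_congr_left
      intro i hi
      rw [List.mem_range] at hi
      have hwin : i + k.toNat ≤ stones.length := by omega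
      simp only [Function.comp, zero_add]
      have hgS : PySem.List.pyGetD (buildSuf k (stones.length : Int) 0 stones) (i : Int) 0 =
          (buildSuf k (stones.length : Int) 0 stones)[i]'(by rw [buildSuf_length]; omega) := by
        rw [PySem.List.pyGetD_natCast]
        exact List.getD_eq_getElem _ _ (by rw [buildSuf_length]; omega)
      have hcastP : ((i : Int) + k - 1) = ((i + k.toNat - 1 : Nat) : Int) := by
        omega
      have hgP : PySem.List.pyGetD (buildPre k 0 0 stones) ((i : Int) + k - 1) 0 =
          (buildPre k 0 0 stones)[i + k.toNat - 1]'(by rw [buildPre_length]; omega) := by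
        rw [hcastP, PySem.List.pyGetD_natCast]
        exact List.getD_eq_getElem _ _ (by rw [buildPre_length]; omega)
      rw [hgS, hgP]
      exact window_max stones hk hwin
    rw [hlist, min?_eq_nmin (wins_ne_nil (stones := stones) (K := k.toNat))]
    show (if nmin (wins stones k.toNat) > 1 then nmin (wins stones k.toNat) else 1) = _
    unfold Mv
    simp only [max_def]
    split_ifs <;> omega

-- ===== VERDICT (by name: the statement is the Claim_ definition above) =====
theorem solution_spec : Claim_equal_solution := by
  intro stones k _ hpre
  unfold Spec_solution
  rw [solution_eq stones k hpre.1 hpre.2, solution_alt_eq stones k hpre.1 hpre.2]
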